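-- pv_equiv track=rewrite | github.com/ar90n/lab | contest/atcoder/abc113/C/main.py | solve
-- ===== SOURCE A (Python) =====
-- def solve(N: int, M: int, P: "List[int]", Y: "List[int]"):
--     d = {}
--     for i, (p, y) in enumerate(zip(P, Y)):
--         d.setdefault(p, []).append((y, i))
--
--     r = []
--     for p, vs in d.items():
--         r += [(n, "{:06}{:06}".format(p, i+1)) for i, (_, n) in enumerate(sorted(vs))]
--     r.sort()
--
--     return '\n'.join([c for _, c in r])
-- ===== SOURCE B (Python) =====
-- def solve(N: int, M: int, P: "List[int]", Y: "List[int]"):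
--     pairs = list(zip(P, Y))
--     codes = []
--     for i, (p, y) in enumerate(pairs):
--         rank = 1 + sum(1 for j, (q, z) in enumerate(pairs)
--                        if q == p and (z < y or (z == y and j < i)))
--         codes.append('{:06}{:06}'.format(p, rank))
--     return '\n'.join(codes)
-- ===== Notes on version B (the rewrite author's own statement) =====
-- stated objective: alternative
-- what changed: A groups cities into a dict of per-prefecture lists, sorts each group, formats ranks, then re-sorts everything by original index; B does no grouping and no sorting at all: for each city it computes its rank directly as 1 + the number of same-prefecture cities strictly earlier by (year, index), emitting codes in input order.
import Mathlib
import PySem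

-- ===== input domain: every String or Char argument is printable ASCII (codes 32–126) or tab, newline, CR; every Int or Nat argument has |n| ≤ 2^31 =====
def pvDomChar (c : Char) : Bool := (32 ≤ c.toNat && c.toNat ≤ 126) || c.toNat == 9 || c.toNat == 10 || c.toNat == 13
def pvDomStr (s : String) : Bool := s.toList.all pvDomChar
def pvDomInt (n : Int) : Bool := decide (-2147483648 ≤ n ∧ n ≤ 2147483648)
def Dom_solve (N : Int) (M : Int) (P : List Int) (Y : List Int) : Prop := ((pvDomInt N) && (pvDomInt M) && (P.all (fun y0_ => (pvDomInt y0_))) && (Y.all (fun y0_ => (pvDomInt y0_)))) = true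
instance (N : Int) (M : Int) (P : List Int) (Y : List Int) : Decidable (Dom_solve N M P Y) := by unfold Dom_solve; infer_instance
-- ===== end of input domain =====

-- B replaces A's dict-of-lists grouping + per-group sorts + global re-sort by a direct per-city
-- rank count (rank = 1 + number of same-prefecture cities strictly earlier by (year, index));
-- objective: alternative (no dict and no sorting; same results, not claimed faster).

-- helper shared by both ports: '{:06}'.format(n) — zero-pad to width 6, sign-aware
def pad6 (n : Int) : List Char :=
  let s := PySem.Int.toChars n
  if n < 0 then '-' :: (List.replicate (6 - s.length) '0' ++ s.tail)
  else List.replicate (6 - s.length) '0' ++ s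

-- "{:06}{:06}".format(p, c)
def fmt (p c : Int) : String := String.mk (pad6 p ++ pad6 c)

-- ===== PORT A =====
def solve (N : Int) (M : Int) (P : List Int) (Y : List Int) : String :=
  let d := (PySem.List.enumerate (P.zip Y)).foldl
      (fun d e => d.modify e.2.1 [] (fun vs => vs ++ [(e.2.2, e.1)])) PySem.Dict.empty
  let r := d.items.foldl
      (fun r pv => r ++ (PySem.List.enumerate (PySem.List.sorted2 pv.2 (fun v => v.1) (fun v => v.2))).map
        (fun iv => (iv.2.2, fmt pv.1 (iv.1 + 1)))) []
  let rs := PySem.List.sorted2 r (fun x => x.1) (fun x => x.2)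
  PySem.Str.join "\n" (rs.map (fun x => x.2))

-- ===== PORT B =====
def solve_alt (N : Int) (M : Int) (P : List Int) (Y : List Int) : String :=
  let pairs := P.zip Y
  let codes := (PySem.List.enumerate pairs).foldl (fun acc e =>
      acc ++ [fmt e.2.1 (1 + ((PySem.List.enumerate pairs).countP (fun f =>
        f.2.1 == e.2.1 && (f.2.2 < e.2.2 || (f.2.2 == e.2.2 && f.1 < e.1)))) : Int)]) []
  PySem.Str.join "\n" codes

-- ===== PRECONDITION & SPEC =====
def Spec_solve (N : Int) (M : Int) (P : List Int) (Y : List Int) (out : String) : Prop := out = solve_alt N M P Y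
instance (N : Int) (M : Int) (P : List Int) (Y : List Int) (out : String) : Decidable (Spec_solve N M P Y out) := by unfold Spec_solve; infer_instance

-- ===== CLAIM (what is proved, stated in full; the proofs are below) =====
def Claim_equal_solve : Prop := ∀ (N : Int) (M : Int) (P : List Int) (Y : List Int), Dom_solve N M P Y → Spec_solve N M P Y (solve N M P Y)

-- ===== LEMMAS AND PROOFS =====

theorem lex_bool_eq (a b c d : Int) :
    (decide (a < c) || (a == c && decide (b < d))) = decide (toLex (a, b) < toLex (c, d)) := by
  rcases lt_trichotomy a c with h | h | h
  · simp [Prod.Lex.toLex_lt_toLex, h]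
  · simp [Prod.Lex.toLex_lt_toLex, h]
  · simp [Prod.Lex.toLex_lt_toLex, not_lt_of_gt h, h.ne']


theorem sorted2_eq_sorted_toLex {α κ₁ κ₂ : Type} [LinearOrder κ₁] [LinearOrder κ₂]
    (xs : List α) (k1 : α → κ₁) (k2 : α → κ₂) :
    PySem.List.sorted2 xs k1 k2 = PySem.List.sorted xs (fun a => toLex (k1 a, k2 a)) := by
  have hb : (fun a b => decide (k1 a < k1 b) || (!decide (k1 b < k1 a) && decide (k2 a < k2 b)))
          = (fun (a b : α) => decide (toLex (k1 a, k2 a) < toLex (k1 b, k2 b))) := by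
    funext a b
    rcases lt_trichotomy (k1 a) (k1 b) with h|h|h
    · simp [Prod.Lex.toLex_lt_toLex, h]
    · simp [Prod.Lex.toLex_lt_toLex, h]
    · simp [Prod.Lex.toLex_lt_toLex, h, not_lt_of_gt h, h.ne']
  rw [PySem.List.sorted_eq_foldl_insertBy]
  unfold PySem.List.sorted2
  simp only [if_neg (by decide : ¬ (false = true))]
  rw [hb]


theorem countP_lt_of_pairwise {α κ : Type} [LinearOrder κ] (S : List α) (key : α → κ)
    (h : S.Pairwise (fun a b => key a < key b)) (k : Nat) (hk : k < S.length) :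
    S.countP (fun z => decide (key z < key S[k])) = k := by
  have hpg := List.pairwise_iff_getElem.1 h
  have hsplit : S.countP (fun z => decide (key z < key S[k]))
      = (S.take k).countP (fun z => decide (key z < key S[k]))
        + (S.drop k).countP (fun z => decide (key z < key S[k])) := by
    rw [← List.countP_append, List.take_append_drop]
  rw [hsplit]
  have h1 : (S.take k).countP (fun z => decide (key z < key S[k])) = (S.take k).length := by
    rw [List.countP_eq_length]
    intro a ha
    obtain ⟨i, hi, rfl⟩ := List.mem_iff_getElem.1 ha
    have hik : i < k := by simpa using hi.trans_le (List.length_take_le k S)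
    simp only [List.getElem_take, decide_eq_true_eq]
    exact hpg i k (by omega) hk hik
  have h2 : (S.drop k).countP (fun z => decide (key z < key S[k])) = 0 := by
    rw [List.countP_eq_zero]
    intro a ha
    obtain ⟨i, hi, rfl⟩ := List.mem_iff_getElem.1 ha
    have hlen : i < S.length - k := by simpa using hi
    have : (S.drop k)[i] = S[k + i]'(by omega) := by
      simp [List.getElem_drop]
    rw [this]
    simp only [decide_eq_true_eq, not_lt]
    rcases Nat.eq_or_lt_of_le (Nat.le_add_right k i) with he | hlt
    · have hi0 : i = 0 := by omega
      subst hi0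
      simp
    · exact le_of_lt (hpg k (k+i) hk (by omega) hlt)
  rw [h1, h2, List.length_take]
  omega


theorem perm_flatMap_filter {α κ : Type} [BEq κ] [LawfulBEq κ] (ks : List κ) (l : List α) (key : α → κ)
    (hnd : ks.Nodup) (hall : ∀ x ∈ l, key x ∈ ks) :
    (ks.flatMap (fun k => l.filter (fun x => key x == k))).Perm l := by
  induction ks generalizing l with
  | nil =>
    cases l with
    | nil => simp
    | cons a t => exact absurd (hall a (by simp)) (by simp)
  | cons k ks ih =>
    rw [List.flatMap_cons]
    have hrest : ks.flatMap (fun k' => l.filter (fun x => key x == k'))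
        = ks.flatMap (fun k' => (l.filter (fun x => !(key x == k))).filter (fun x => key x == k')) := by
      apply List.flatMap_congr
      intro k' hk'
      rw [List.filter_filter]
      apply List.filter_congr
      intro x _
      by_cases hx : key x == k'
      · have : ¬ (key x == k) = true := by
          simp only [beq_iff_eq] at hx ⊢
          rintro rfl
          exact (List.nodup_cons.1 hnd).1 (hx ▸ hk')
        simp [hx, this]
      · simp [hx]
    rw [hrest]
    have hsub : (ks.flatMap (fun k' => (l.filter (fun x => !(key x == k))).filter (fun x => key x == k'))).Perm
        (l.filter (fun x => !(key x == k))) := by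
      apply ih _ ((List.nodup_cons.1 hnd).2)
      intro x hx
      have hmem := List.mem_filter.1 hx
      have := hall x hmem.1
      simp only [List.mem_cons] at this
      rcases this with h | h
      · exfalso
        have : (key x == k) = true := by simp [h]
        simp [this] at hmem
      · exact h
    exact (hsub.append_left _).trans (List.filter_append_perm _ l)


theorem dict_items_eq_keys_map {κ : Type} [BEq κ] [LawfulBEq κ] {β : Type}
    (d : PySem.Dict κ (List β)) (h : d.keys.Nodup) :
    d.items = d.keys.map (fun k => (k, d.getD k [])) := by
  have hkeys : d.keys = d.items.map (fun p => p.1) := by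
    simp only [PySem.Dict.keys]
  rw [hkeys, List.map_map]
  conv_lhs => rw [← List.map_id d.items]
  apply List.map_congr_left
  intro p hp
  have := PySem.Dict.getD_of_mem_items d (k := p.1) (v := p.2) (by simpa using hp) h []
  simp [Function.comp, this]


theorem perm_flatMap_congr {α β : Type} (l : List α) (f g : α → List β)
    (h : ∀ a ∈ l, (f a).Perm (g a)) : (l.flatMap f).Perm (l.flatMap g) := by
  induction l with
  | nil => simp
  | cons a t ih =>
    simp only [List.flatMap_cons]
    exact (h a (by simp)).append (ih (fun x hx => h x (by simp [hx])))


theorem group_perm (P Y : List Int) (p : Int) :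
    ((PySem.List.enumerate (PySem.List.sorted2
        ((((PySem.List.enumerate (P.zip Y)).map (fun e => (e.2.1, (e.2.2, e.1)))).filter
          (fun q => q.1 == p)).map (fun q => q.2))
        (fun v => v.1) (fun v => v.2))).map
      (fun iv => (iv.2.2, fmt p (iv.1 + 1)))).Perm
    (((PySem.List.enumerate (P.zip Y)).filter (fun e => e.2.1 == p)).map
      (fun e => (e.1, fmt e.2.1 (1 + (((PySem.List.enumerate (P.zip Y)).countP (fun g =>
        g.2.1 == e.2.1 && (g.2.2 < e.2.2 || (g.2.2 == e.2.2 && g.1 < e.1)))) : Int))))) := by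
  set L := PySem.List.enumerate (P.zip Y) with hL
  set F := L.filter (fun e => e.2.1 == p) with hF
  set swp : Int × (Int × Int) → Int × Int := fun e => (e.2.2, e.1) with hswp
  have hvs : (((L.map (fun e => (e.2.1, (e.2.2, e.1)))).filter (fun q => q.1 == p)).map (fun q => q.2))
      = F.map swp := by
    rw [List.filter_map, List.map_map]
    rfl
  rw [hvs, sorted2_eq_sorted_toLex]
  set lexkey : Int × Int → Lex (Int × Int) := fun v => toLex (v.1, v.2) with hlex
  set vs := F.map swp with hvsdef
  set S := PySem.List.sorted vs lexkey with hS
  have hSperm : S.Perm vs := by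
    rw [hS, PySem.List.sorted_eq_foldl_insertBy]
    simpa using PySem.List.foldl_insertBy_perm _ vs []
  have hpF : F.Pairwise (fun a b => a.1 < b.1) :=
    List.Pairwise.sublist List.filter_sublist (PySem.List.pairwise_lt_enumerate (P.zip Y) 0)
  have hpvs : vs.Pairwise (fun a b => a.2 < b.2) := by
    rw [hvsdef, List.pairwise_map]
    exact hpF
  have hvsnd : vs.Nodup := by
    apply hpvs.imp
    intro a b hab
    intro hEq
    rw [hEq] at hab
    exact lt_irrefl _ hab
  have hlexinj : Function.Injective lexkey := by
    intro a b h
    have h2 := toLex.injective h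
    simpa [Prod.ext_iff] using h2
  have hSlt : S.Pairwise (fun a b => lexkey a < lexkey b) := by
    have hSle := PySem.List.sorted_pairwise vs lexkey
    have hSnd : S.Nodup := (hSperm.nodup_iff).2 hvsnd
    exact (hSle.and hSnd).imp (fun hab => lt_of_le_of_ne hab.1 (fun hk => hab.2 (hlexinj hk)))
  set phi : Int × Int → Int × String := fun v =>
    (v.2, fmt p (1 + (S.countP (fun w => decide (lexkey w < lexkey v)) : Int))) with hphi
  have hA : (PySem.List.enumerate S).map (fun iv => (iv.2.2, fmt p (iv.1 + 1))) = S.map phi := by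
    apply List.ext_getElem
    · simp [PySem.List.length_enumerate]
    intro k h1 h2
    simp only [List.getElem_map]
    rw [PySem.List.getElem_enumerate]
    simp only [hphi]
    rw [countP_lt_of_pairwise S lexkey hSlt k (by simpa [PySem.List.length_enumerate] using h1)]
    have : (0 : Int) + (k : Int) + 1 = 1 + (k : Int) := by ring
    rw [this]
  have hC : vs.map phi = F.map (fun e => (e.1, fmt e.2.1 (1 + ((L.countP (fun g =>
      g.2.1 == e.2.1 && (g.2.2 < e.2.2 || (g.2.2 == e.2.2 && g.1 < e.1)))) : Int)))) := by
    rw [hvsdef, List.map_map]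
    apply List.map_congr_left
    intro e he
    have hep : e.2.1 = p := by
      have := (List.mem_filter.1 (hF ▸ he)).2
      simpa using this
    simp only [Function.comp, hphi, hswp]
    have hcnt : S.countP (fun w => decide (lexkey w < lexkey (e.2.2, e.1)))
        = L.countP (fun g => g.2.1 == e.2.1 && (g.2.2 < e.2.2 || (g.2.2 == e.2.2 && g.1 < e.1))) := by
      rw [hSperm.countP_eq, hvsdef, List.countP_map]
      have hFL : F.countP ((fun w => decide (lexkey w < lexkey (e.2.2, e.1))) ∘ swp)
          = L.countP (fun g => ((fun w => decide (lexkey w < lexkey (e.2.2, e.1))) ∘ swp) g && (g.2.1 == p)) := by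
        rw [hF, List.countP_filter]
      rw [hFL]
      apply List.countP_congr
      intro g _
      simp only [Function.comp, hswp, hlex, hep]
      rw [← lex_bool_eq]
      by_cases h1 : g.2.1 == p <;> by_cases h2 : (g.2.2 : Int) < e.2.2 <;>
        by_cases h3 : g.2.2 == e.2.2 <;> by_cases h4 : (g.1 : Int) < e.1 <;>
        simp [h1, h2, h3, h4]
    rw [hcnt, hep]
  rw [hA, ← hC]
  exact hSperm.map phi

theorem solve_eq : ∀ (N M : Int) (P Y : List Int), solve N M P Y = solve_alt N M P Y := by
  intro N M P Y
  simp only [solve, solve_alt]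
  set L := PySem.List.enumerate (P.zip Y) with hL
  -- B side: the foldl-append loop is a map
  rw [PySem.List.foldl_append_singleton_eq_map]
  simp only [List.nil_append]
  set code : Int × (Int × Int) → String := fun e =>
    fmt e.2.1 (1 + ((L.countP (fun f =>
      f.2.1 == e.2.1 && (f.2.2 < e.2.2 || (f.2.2 == e.2.2 && f.1 < e.1)))) : Int)) with hcode
  set f : Int × (Int × Int) → Int × String := fun e => (e.1, code e) with hf
  suffices hrs : PySem.List.sorted2
      ((((L.foldl (fun d e => d.modify e.2.1 [] (fun vs => vs ++ [(e.2.2, e.1)])) PySem.Dict.empty)).items).foldl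
        (fun r pv => r ++ (PySem.List.enumerate (PySem.List.sorted2 pv.2 (fun v => v.1) (fun v => v.2))).map
          (fun iv => (iv.2.2, fmt pv.1 (iv.1 + 1)))) [])
      (fun x => x.1) (fun x => x.2) = L.map f by
    rw [hrs, List.map_map]
    congr 1
  -- abbreviations
  set tof : Int × (Int × Int) → Int × (Int × Int) := fun e => (e.2.1, (e.2.2, e.1)) with htof
  set d := L.foldl (fun d e => d.modify e.2.1 [] (fun vs => vs ++ [(e.2.2, e.1)])) PySem.Dict.empty with hd
  have hd' : d = (L.map tof).foldl (fun d p => d.modify p.1 [] (fun vs => vs ++ [p.2])) PySem.Dict.empty := by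
    rw [hd, List.foldl_map]
  have hdk : d.keys = PySem.Set.ofList (L.map (fun e => e.2.1)) := by
    rw [hd]
    rw [PySem.Dict.keys_foldl_modify_key L (fun e => e.2.1) [] (fun d e vs => vs ++ [(e.2.2, e.1)]) PySem.Dict.empty]
    simp [PySem.Set.update, PySem.Set.ofList_eq_foldl]
  have hnd : d.keys.Nodup := by
    rw [hd]
    exact PySem.Dict.nodup_keys_foldl_modify_key L (fun e => e.2.1) [] (fun d e vs => vs ++ [(e.2.2, e.1)]) PySem.Dict.empty (by simp)
  have hgetD : ∀ p, d.getD p [] = ((L.map tof).filter (fun q => q.1 == p)).map (fun q => q.2) := by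
    intro p
    rw [hd']
    simpa using PySem.Dict.getD_foldl_modify_append (L.map tof) PySem.Dict.empty p
  have hitems : d.items = (PySem.Set.ofList (L.map (fun e => e.2.1))).map
      (fun p => (p, ((L.map tof).filter (fun q => q.1 == p)).map (fun q => q.2))) := by
    rw [dict_items_eq_keys_map d hnd, hdk]
    apply List.map_congr_left
    intro p _
    rw [hgetD]
  set ks := PySem.Set.ofList (L.map (fun e => e.2.1)) with hks
  rw [hitems]
  rw [PySem.List.foldl_append_eq_flatMap]
  simp only [List.nil_append]
  rw [List.flatMap_map]
  -- the target is a permutation of the flatMap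
  have hall : ∀ e ∈ L, e.2.1 ∈ ks := by
    intro e he
    rw [hks, PySem.Set.mem_ofList]
    exact List.mem_map_of_mem he
  have hLperm : (ks.flatMap (fun p => L.filter (fun e => e.2.1 == p))).Perm L :=
    perm_flatMap_filter ks L (fun e => e.2.1) (PySem.Set.nodup_ofList _) hall
  have htargetperm : (L.map f).Perm (ks.flatMap (fun p => (L.filter (fun e => e.2.1 == p)).map f)) := by
    have h1 := hLperm.map f
    rw [List.map_flatMap] at h1
    exact h1.symm
  have hgroup : ∀ p ∈ ks,
      ((PySem.List.enumerate (PySem.List.sorted2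
          (((L.map tof).filter (fun q => q.1 == p)).map (fun q => q.2))
          (fun v => v.1) (fun v => v.2))).map
        (fun iv => (iv.2.2, fmt p (iv.1 + 1)))).Perm
      ((L.filter (fun e => e.2.1 == p)).map f) := by
    intro p _
    exact group_perm P Y p
  have hperm : (L.map f).Perm
      (ks.flatMap (fun p =>
        (PySem.List.enumerate (PySem.List.sorted2
          (((L.map tof).filter (fun q => q.1 == p)).map (fun q => q.2))
          (fun v => v.1) (fun v => v.2))).map
        (fun iv => (iv.2.2, fmt p (iv.1 + 1))))) :=
    htargetperm.trans (perm_flatMap_congr ks _ _ hgroup).symm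
  have hpw : (L.map f).Pairwise (fun a b => toLex (a.1, a.2) < toLex (b.1, b.2)) := by
    rw [List.pairwise_map]
    apply (PySem.List.pairwise_lt_enumerate (P.zip Y) 0).imp
    intro a b hab
    rw [Prod.Lex.toLex_lt_toLex]
    exact Or.inl hab
  rw [sorted2_eq_sorted_toLex]
  exact PySem.List.sorted_eq_of_perm_of_pairwise_lt _ (L.map f) (fun x => toLex (x.1, x.2)) hperm hpw

-- ===== VERDICT (by name: the statement is the Claim_ definition above) =====
theorem solve_spec : Claim_equal_solve := by
  intro N M P Y _
  exact solve_eq N M P Y
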